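-- pv_equiv track=rewrite | github.com/Genesis-Embodied-AI/Genesis | genesis/engine/couplers/ipc_array_class.py | categorize_entities_by_coupling_type
-- ===== SOURCE A (Python) =====
-- def categorize_entities_by_coupling_type(entity_coupling_types):
--     """
--     Partition entity indices by coupling mode.
--
--     Parameters
--     ----------
--     entity_coupling_types : dict
--         Maps ``entity_idx`` → coupling mode string.
--
--     Returns
--     -------
--     dict
--         Maps each coupling mode string to a list of entity indices.
--     """
--     result = {
--         "two_way": [],
--         "external_articulation": [],
--         "ipc_only": [],
--     }
--
--     for entity_idx, coupling_type in entity_coupling_types.items():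
--         if coupling_type in result:
--             result[coupling_type].append(entity_idx)
--
--     return result
-- ===== SOURCE B (Python) =====
-- def categorize_entities_by_coupling_type(entity_coupling_types):
--     return {
--         name: [idx for idx, ct in entity_coupling_types.items() if ct == name]
--         for name in ("two_way", "external_articulation", "ipc_only")
--     }
-- ===== Notes on version B (the rewrite author's own statement) =====
-- stated objective: idiomatic
-- what changed: Replaces the single scatter pass that dispatches each entry into a pre-seeded mutable bucket dict with a dict comprehension over the three fixed coupling-type names, each bucket built by its own filtered scan of items().
import Mathlib
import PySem

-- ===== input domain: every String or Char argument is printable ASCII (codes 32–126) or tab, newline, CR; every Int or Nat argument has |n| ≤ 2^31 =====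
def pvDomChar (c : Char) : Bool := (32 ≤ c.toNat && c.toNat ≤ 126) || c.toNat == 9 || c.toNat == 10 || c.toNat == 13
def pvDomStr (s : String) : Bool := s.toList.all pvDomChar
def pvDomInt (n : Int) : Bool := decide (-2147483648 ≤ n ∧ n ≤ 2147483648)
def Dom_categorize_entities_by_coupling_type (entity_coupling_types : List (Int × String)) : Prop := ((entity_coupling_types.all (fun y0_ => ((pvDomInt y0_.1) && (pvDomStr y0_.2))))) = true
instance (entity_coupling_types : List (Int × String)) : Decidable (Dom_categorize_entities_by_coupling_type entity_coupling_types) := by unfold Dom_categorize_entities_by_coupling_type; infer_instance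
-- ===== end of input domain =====

-- B replaces A's single scatter pass into a pre-seeded mutable bucket dict by a dict
-- comprehension over the three fixed names, each bucket built by its own filtered scan (idiomatic).

-- ===== PORT A =====
-- result = {"two_way": [], "external_articulation": [], "ipc_only": []}
-- for entity_idx, coupling_type in entity_coupling_types.items():
--     if coupling_type in result: result[coupling_type].append(entity_idx)
def catStepA (d : PySem.Dict String (List Int)) (p : Int × String) : PySem.Dict String (List Int) :=
  if d.contains p.2 then d.modify p.2 [] (fun l => l ++ [p.1]) else d

def categorize_entities_by_coupling_type (entity_coupling_types : List (Int × String)) : List (String × List Int) :=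
  (entity_coupling_types.foldl catStepA
    (PySem.Dict.ofList [("two_way", ([] : List Int)), ("external_articulation", []), ("ipc_only", [])])).items

-- ===== PORT B =====
-- {name: [idx for idx, ct in entity_coupling_types.items() if ct == name]
--  for name in ("two_way", "external_articulation", "ipc_only")}
def categorize_entities_by_coupling_type_alt (entity_coupling_types : List (Int × String)) : List (String × List Int) :=
  ["two_way", "external_articulation", "ipc_only"].map
    (fun name => (name, (entity_coupling_types.filter (fun p => p.2 == name)).map (fun p => p.1)))

-- ===== PRECONDITION & SPEC =====
def Spec_categorize_entities_by_coupling_type (entity_coupling_types : List (Int × String)) (out : List (String × List Int)) : Prop := out = categorize_entities_by_coupling_type_alt entity_coupling_types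
instance (entity_coupling_types : List (Int × String)) (out : List (String × List Int)) : Decidable (Spec_categorize_entities_by_coupling_type entity_coupling_types out) := by unfold Spec_categorize_entities_by_coupling_type; infer_instance

-- ===== CLAIM (what is proved, stated in full; the proofs are below) =====
def Claim_equal_categorize_entities_by_coupling_type : Prop := ∀ (entity_coupling_types : List (Int × String)), Dom_categorize_entities_by_coupling_type entity_coupling_types → Spec_categorize_entities_by_coupling_type entity_coupling_types (categorize_entities_by_coupling_type entity_coupling_types)

-- ===== LEMMAS AND PROOFS =====

def catKeys : List String := ["two_way", "external_articulation", "ipc_only"]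

lemma catStepA_keys (l : List (Int × String)) (d : PySem.Dict String (List Int))
    (hk : d.keys = catKeys) : (l.foldl catStepA d).keys = catKeys := by
  induction l generalizing d with
  | nil => exact hk
  | cons p rest ih =>
    simp only [List.foldl_cons]
    apply ih
    unfold catStepA
    by_cases h : d.contains p.2 = true
    · rw [if_pos h, PySem.Dict.keys_modify, PySem.Dict.keys_insert_of_contains _ _ h, hk]
    · rw [if_neg h]; exact hk

lemma catStepA_getD (l : List (Int × String)) (d : PySem.Dict String (List Int))
    (hk : d.keys = catKeys) (c : String) (hc : c ∈ catKeys) :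
    (l.foldl catStepA d).getD c [] = d.getD c [] ++ (l.filter (fun p => p.2 == c)).map (fun p => p.1) := by
  induction l generalizing d with
  | nil => simp
  | cons p rest ih =>
    simp only [List.foldl_cons]
    by_cases h : d.contains p.2 = true
    · have hstep : catStepA d p = d.modify p.2 [] (fun l => l ++ [p.1]) := by
        unfold catStepA; rw [if_pos h]
      rw [hstep, ih _ (by rw [PySem.Dict.keys_modify, PySem.Dict.keys_insert_of_contains _ _ h, hk]),
        PySem.Dict.getD_modify]
      by_cases hcp : c = p.2
      · simp [hcp]
      · have : ¬ (p.2 == c) = true := by simpa using fun hh => hcp hh.symm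
        simp [hcp, this]
    · have hstep : catStepA d p = d := by unfold catStepA; rw [if_neg h]
      have hne : ¬ (p.2 == c) = true := by
        intro hh
        apply h
        rw [PySem.Dict.contains_iff_mem_keys, hk]
        simpa using (beq_iff_eq.mp hh) ▸ hc
      rw [hstep, ih d hk, List.filter_cons, if_neg hne]

-- ===== VERDICT (by name: the statement is the Claim_ definition above) =====
theorem categorize_entities_by_coupling_type_spec : Claim_equal_categorize_entities_by_coupling_type := by
  intro l _
  unfold Spec_categorize_entities_by_coupling_type
  unfold categorize_entities_by_coupling_type categorize_entities_by_coupling_type_alt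
  have hk0 : (PySem.Dict.ofList [("two_way", ([] : List Int)), ("external_articulation", []), ("ipc_only", [])]).keys = catKeys := by decide
  have hkeys := catStepA_keys l _ hk0
  rw [PySem.Dict.items_eq_map_keys _ (by rw [hkeys]; decide) [], hkeys]
  apply List.map_congr_left
  intro c hc
  rw [catStepA_getD l _ hk0 c hc]
  have h0 : (PySem.Dict.ofList [("two_way", ([] : List Int)), ("external_articulation", []), ("ipc_only", [])]).getD c [] = [] := by
    fin_cases hc <;> decide
  rw [h0, List.nil_append]
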